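-- pv_equiv track=rewrite | github.com/pypi-data/pypi-mirror-362 | packages/txtree/txtree-2025.7.17-py3-none-any.whl/txtree/internal/sweep/internal/scan_mask.py | scan_mask
-- ===== SOURCE A (Python) =====
-- def scan_mask(xseq, xmask):
--     """
--     Performs a scan on the sequence `xseq` based on the mask `xmask`.
--     Optimizes memory usage for masks with large `nbits`.
--
--     Parameters:
--         xseq (str): Amino acid sequence.
--         xmask (list or array-like): Binary mask to apply to the sequence.
--
--     Returns:
--         list: Extracted columns based on the mask.
--     """
--     xseq_len = len(xseq)  # Length of the sequence
--
--     # Ensure a minimum sequence length of 10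
--     min_len = 10
--     if xseq_len < min_len:
--         xseq = xseq + "K" * (min_len - xseq_len)
--         xseq = xseq[:min_len]
--
--         xseq_len = min_len
--
--     # Indices where the mask is 1
--     ids = (i for i, bit in enumerate(xmask) if bit)
--
--     IDS = [
--         range(idx, min(idx + xseq_len, xseq_len))
--         for idx in ids
--     ]
--
--     # Find the minimum length across all IDS arrays
--     lmx = min(map(len, IDS))
--
--     # Extract columns based on the mask and ensure uniformity
--     xcols = [xseq[idx] for ids_array in IDS for idx in ids_array[:lmx]]
--
--     xcols = [xcols[i:i+lmx] for i in range(0, len(xcols), lmx)]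
--
--     xcols = list(zip(*xcols))
--
--     return xcols
-- ===== SOURCE B (Python) =====
-- def scan_mask(xseq, xmask):
--     xseq_len = len(xseq)
--     min_len = 10
--     if xseq_len < min_len:
--         xseq = (xseq + "K" * (min_len - xseq_len))[:min_len]
--         xseq_len = min_len
--     indices = [i for i, bit in enumerate(xmask) if bit]
--     lmx = max(0, xseq_len - max(indices))
--     return [tuple(xseq[idx + j] for idx in indices) for j in range(lmx)]
-- ===== Notes on version B (the rewrite author's own statement) =====
-- stated objective: simpler
-- what changed: B keeps the length/padding preamble but replaces A's whole pipeline (per-index ranges, min of range lengths, flat column list, reshape by slicing, zip-transpose) with one direct column-major comprehension: lmx = max(0, xseq_len - max(masked indices)) and the result is built tuple by tuple.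
import Mathlib
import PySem

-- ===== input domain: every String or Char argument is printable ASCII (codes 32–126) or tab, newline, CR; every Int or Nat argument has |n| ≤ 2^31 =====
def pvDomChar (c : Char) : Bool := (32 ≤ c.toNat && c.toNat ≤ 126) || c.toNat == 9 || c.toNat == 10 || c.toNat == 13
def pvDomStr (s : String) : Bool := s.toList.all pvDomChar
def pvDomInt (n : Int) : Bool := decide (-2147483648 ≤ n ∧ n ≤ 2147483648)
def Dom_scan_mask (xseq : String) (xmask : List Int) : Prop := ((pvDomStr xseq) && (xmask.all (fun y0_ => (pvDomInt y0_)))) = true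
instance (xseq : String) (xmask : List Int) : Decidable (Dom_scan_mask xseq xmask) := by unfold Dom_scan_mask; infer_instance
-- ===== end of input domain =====

-- B replaces A's range/min/flatten/reshape/zip pipeline with one direct column-major build (objective: simpler).

-- ===== PORT A =====
-- port of Python's builtin zip(*rows): min of the row lengths many columns
def pvZipStar (rows : List (List String)) : List (List String) :=
  (List.range (((rows.map List.length).min?).getD 0)).map (fun j => rows.map (fun r => r.getD j ""))

def scan_mask (xseq : String) (xmask : List Int) : List (List String) :=
  let xl0 : Int := (xseq.toList.length : Int)
  let s : List Char := if xl0 < 10 then (xseq.toList ++ List.replicate (10 - xseq.toList.length) 'K').take 10 else xseq.toList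
  let n : Int := if xl0 < 10 then 10 else xl0
  let ids : List Int := ((PySem.List.enumerate xmask 0).filter (fun p => p.2 != 0)).map (fun p => p.1)
  let IDS : List (List Int) := ids.map (fun idx => PySem.List.pyRange idx (min (idx + n) n) 1)
  let lmx : Int := (PySem.List.min? (IDS.map (fun r => (r.length : Int))) (fun x => x)).getD 0   -- .getD 0: min() of an empty sequence raises; excluded by Pre_
  let xcols : List String := IDS.flatMap (fun r => (PySem.List.slice r none (some lmx)).map (fun idx => ((PySem.List.pyGet? s idx).getD 'K').toString))
  let chunks : List (List String) := (PySem.List.pyRange 0 (xcols.length : Int) lmx).map (fun i => PySem.List.slice xcols (some i) (some (i + lmx)))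
  pvZipStar chunks

-- ===== PORT B =====
def scan_mask_alt (xseq : String) (xmask : List Int) : List (List String) :=
  let xl0 : Int := (xseq.toList.length : Int)
  let s : List Char := if xl0 < 10 then (xseq.toList ++ List.replicate (10 - xseq.toList.length) 'K').take 10 else xseq.toList
  let n : Int := if xl0 < 10 then 10 else xl0
  let indices : List Int := ((PySem.List.enumerate xmask 0).filter (fun p => p.2 != 0)).map (fun p => p.1)
  let lmx : Int := max 0 (n - (PySem.List.max? indices (fun x => x)).getD 0)   -- .getD 0: max() of an empty sequence raises; excluded by Pre_
  (PySem.List.pyRange 0 lmx 1).map (fun j => indices.map (fun idx => ((PySem.List.pyGet? s (idx + j)).getD 'K').toString))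

-- ===== PRECONDITION & SPEC =====
-- Pre_ excludes exactly the inputs on which Python A raises ValueError: a mask with no set bit
-- (min() of an empty sequence), and a mask whose set bits all lie at indices ≥ the padded length
-- (the reshape calls range with step 0).
def Pre_scan_mask (xseq : String) (xmask : List Int) : Prop :=
  (∃ b ∈ xmask, b ≠ 0) ∧ ∀ p ∈ PySem.List.enumerate xmask 0, p.2 ≠ 0 → p.1 < max (xseq.toList.length : Int) 10
instance (xseq : String) (xmask : List Int) : Decidable (Pre_scan_mask xseq xmask) := by unfold Pre_scan_mask; infer_instance

def pvWitness_scan_mask : String × List Int := ("ABCDEFGHIJKL", [1, 0, 1])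

def Spec_scan_mask (xseq : String) (xmask : List Int) (out : List (List String)) : Prop := out = scan_mask_alt xseq xmask
instance (xseq : String) (xmask : List Int) (out : List (List String)) : Decidable (Spec_scan_mask xseq xmask out) := by unfold Spec_scan_mask; infer_instance

-- ===== CLAIM (what is proved, stated in full; the proofs are below) =====
def Claim_equal_scan_mask : Prop := ∀ (xseq : String) (xmask : List Int), Dom_scan_mask xseq xmask → Pre_scan_mask xseq xmask → Spec_scan_mask xseq xmask (scan_mask xseq xmask)

-- ===== LEMMAS AND PROOFS =====

lemma pvFoldlMinConst (L : Nat) : ∀ (t : List Nat), (∀ x ∈ t, x = L) → t.foldl min L = L := by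
  intro t
  induction t with
  | nil => intro _; rfl
  | cons a t ih =>
    intro h
    have ha := h a (by simp)
    simp only [List.foldl_cons, ha, min_self]
    exact ih (fun x hx => h x (List.mem_cons_of_mem _ hx))

lemma pvMinConst (l : List Nat) (L : Nat) (hne : l ≠ []) (h : ∀ x ∈ l, x = L) : l.min? = some L := by
  cases l with
  | nil => exact absurd rfl hne
  | cons a t =>
    rw [List.min?_cons']
    have ha := h a (by simp)
    rw [ha, pvFoldlMinConst L t (fun x hx => h x (List.mem_cons_of_mem _ hx))]

lemma pvChunkNat (L : Nat) : ∀ (rows : List (List String)), (∀ r ∈ rows, r.length = L) →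
    (List.range rows.length).map (fun i => ((rows.flatMap id).drop (L * i)).take L) = rows := by
  intro rows
  induction rows with
  | nil => intro _; rfl
  | cons r rs ih =>
    intro h
    have hr : r.length = L := h r (by simp)
    simp only [List.length_cons, List.range_succ_eq_map, List.map_cons, List.map_map]
    have hhead : (((r :: rs).flatMap id).drop (L * 0)).take L = r := by
      simp only [List.flatMap_cons, Nat.mul_zero, List.drop_zero, id]
      exact List.take_left' hr
    have htail : (List.range rs.length).map
        ((fun i => (((r :: rs).flatMap id).drop (L * i)).take L) ∘ Nat.succ) = rs := by
      have hcong : ∀ i ∈ List.range rs.length,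
          ((fun i => (((r :: rs).flatMap id).drop (L * i)).take L) ∘ Nat.succ) i
            = ((rs.flatMap id).drop (L * i)).take L := by
        intro i _
        have h1 : L * (Nat.succ i) = r.length + L * i := by rw [hr, Nat.mul_succ]; omega
        simp only [Function.comp, List.flatMap_cons, h1, List.drop_append, id]
        rw [List.drop_eq_nil_of_le (by omega : r.length ≤ r.length + L * i), List.nil_append]
        have h2 : r.length + L * i - r.length = L * i := by omega
        rw [h2]
      rw [List.map_congr_left hcong]
      exact ih (fun x hx => h x (List.mem_cons_of_mem _ hx))
    rw [hhead, htail]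

lemma pvChunksInt (rows : List (List String)) (L : Nat) (hL : 0 < L)
    (h : ∀ r ∈ rows, r.length = L) :
    (PySem.List.pyRange 0 (((rows.flatMap id).length : Nat) : Int) (L : Int)).map
      (fun i => PySem.List.slice (rows.flatMap id) (some i) (some (i + (L : Int)))) = rows := by
  have hlen : (rows.flatMap id).length = rows.length * L := by
    rw [List.length_flatMap]
    have hm : rows.map (fun a => (id a).length) = rows.map (fun _ => L) :=
      List.map_congr_left (fun r hr => by simp [h r hr])
    rw [hm, List.map_const', List.sum_replicate, smul_eq_mul]
  have hLi : (0:Int) < (L:Int) := by exact_mod_cast hL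
  rw [PySem.List.pyRange_of_pos _ _ hLi]
  rcases Nat.eq_zero_or_pos rows.length with h0 | hpos
  · have h0' : rows = [] := List.eq_nil_of_length_eq_zero h0
    subst h0'
    simp
  · have hcnt : (if (0:Int) < ((rows.flatMap id).length : Int)
        then ((((rows.flatMap id).length : Int) - 0 + (L:Int) - 1) / (L:Int)).toNat else 0)
        = rows.length := by
      rw [if_pos (by rw [hlen]; exact_mod_cast Nat.mul_pos hpos hL)]
      have h1 : (((rows.flatMap id).length : Int) - 0 + (L:Int) - 1)
          = ((L:Int) - 1) + (rows.length : Int) * (L:Int) := by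
        rw [hlen]; push_cast; ring
      rw [h1, Int.add_mul_ediv_right _ _ (by omega : (L:Int) ≠ 0),
        Int.ediv_eq_zero_of_lt (by omega) (by omega)]
      simp
    rw [hcnt, List.map_map]
    refine (List.map_congr_left ?_).trans (pvChunkNat L rows h)
    intro i hi
    have hi' : i < rows.length := List.mem_range.mp hi
    have ha : ((0:Int) + (L:Int) * (i:Int)) = ((L * i : Nat) : Int) := by push_cast; ring
    have hb : (((L * i : Nat) : Int) + (L:Int)) = ((L * i + L : Nat) : Int) := by push_cast; ring
    simp only [Function.comp]
    rw [ha, hb, PySem.List.slice_toNat _ (by positivity) (by positivity)]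
    rw [Int.toNat_natCast, Int.toNat_natCast]
    congr 1
    omega

-- one row of A: the sliced range, mapped, is the canonical row
lemma pvRowEq (ch : Int → String) (n M idx : Int) (h0 : 0 ≤ idx) (hM : idx ≤ M) (hMn : M < n) :
    (PySem.List.slice (PySem.List.pyRange idx (min (idx + n) n) 1) none (some (n - M))).map ch
      = (List.range (n - M).toNat).map (fun (k : Nat) => ch (idx + (k : Int))) := by
  rw [min_eq_right (by omega : n ≤ idx + n)]
  rw [PySem.List.slice_to _ (by omega : (0:Int) ≤ n - M)]
  rw [PySem.List.pyRange_one_append idx (idx + (n - M)) n (by omega) (by omega)]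
  rw [List.take_left' (by rw [PySem.List.length_pyRange_one]; congr 1; omega)]
  rw [PySem.List.pyRange_one, List.map_map]
  have h2 : (idx + (n - M) - idx) = n - M := by omega
  rw [h2]
  simp [Function.comp]

lemma pvCore (s : List Char) (n : Int) (ids : List Int)
    (IDS : List (List Int)) (lmx : Int) (xcols : List String) (chunks : List (List String)) (lmxB : Int)
    (hids : ∀ idx ∈ ids, 0 ≤ idx ∧ idx < n) (hne : ids ≠ [])
    (hIDS : IDS = ids.map (fun idx => PySem.List.pyRange idx (min (idx + n) n) 1))
    (hlmx : lmx = (PySem.List.min? (IDS.map (fun r => (r.length : Int))) (fun x => x)).getD 0)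
    (hxcols : xcols = IDS.flatMap (fun r => (PySem.List.slice r none (some lmx)).map
        (fun idx => ((PySem.List.pyGet? s idx).getD 'K').toString)))
    (hchunks : chunks = (PySem.List.pyRange 0 ((xcols.length : Nat) : Int) lmx).map
        (fun i => PySem.List.slice xcols (some i) (some (i + lmx))))
    (hlmxB : lmxB = max 0 (n - (PySem.List.max? ids (fun x => x)).getD 0)) :
    pvZipStar chunks
      = (PySem.List.pyRange 0 lmxB 1).map
          (fun j => ids.map (fun idx => ((PySem.List.pyGet? s (idx + j)).getD 'K').toString)) := by
  -- abbreviation for the character extraction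
  set ch : Int → String := fun idx => ((PySem.List.pyGet? s idx).getD 'K').toString with hch
  -- the maximum of ids
  obtain ⟨M, hmax⟩ : ∃ M, PySem.List.max? ids (fun x => x) = some M := by
    cases hm : PySem.List.max? ids (fun x => x) with
    | none => exact absurd ((PySem.List.max?_eq_none_iff ids _).mp hm) hne
    | some M => exact ⟨M, rfl⟩
  have hMmem : M ∈ ids := PySem.List.max?_mem hmax
  have hMub : ∀ y ∈ ids, y ≤ M := PySem.List.max?_isMax hmax
  have hM0 : 0 ≤ M := (hids M hMmem).1
  have hMn : M < n := (hids M hMmem).2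
  set LN : Nat := (n - M).toNat with hLN
  have hLNc : ((LN : Nat) : Int) = n - M := Int.toNat_of_nonneg (by omega)
  have hLNpos : 0 < LN := by omega
  -- lmx = n - M
  have hlmx' : lmx = n - M := by
    have hlens : IDS.map (fun r => (r.length : Int)) = ids.map (fun idx => n - idx) := by
      rw [hIDS, List.map_map]
      refine List.map_congr_left ?_
      intro idx hidx
      have h1 := hids idx hidx
      simp only [Function.comp]
      rw [min_eq_right (by omega : n ≤ idx + n), PySem.List.length_pyRange_one]
      omega
    obtain ⟨m, hmin⟩ : ∃ m, PySem.List.min? (IDS.map (fun r => (r.length : Int))) (fun x => x) = some m := by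
      cases hm : PySem.List.min? (IDS.map (fun r => (r.length : Int))) (fun x => x) with
      | none =>
        rw [PySem.List.min?_eq_none_iff, hlens, List.map_eq_nil_iff] at hm
        exact absurd hm hne
      | some m => exact ⟨m, rfl⟩
    have hmmem : m ∈ IDS.map (fun r => (r.length : Int)) := PySem.List.min?_mem hmin
    rw [hlens] at hmmem
    obtain ⟨idx0, hidx0, hm0⟩ := List.mem_map.mp hmmem
    have hlb : ∀ y ∈ IDS.map (fun r => (r.length : Int)), m ≤ y := PySem.List.min?_isMin hmin
    have hmle : m ≤ n - M := by
      refine hlb _ ?_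
      rw [hlens]
      exact List.mem_map.mpr ⟨M, hMmem, rfl⟩
    have hge : n - M ≤ m := by
      have := hMub idx0 hidx0
      omega
    rw [hlmx, hmin]
    simp only [Option.getD_some]
    omega
  -- the canonical rows
  set rows : List (List String) := ids.map (fun idx => (List.range LN).map (fun (k : Nat) => ch (idx + (k : Int)))) with hrows
  have hrowlen : ∀ r ∈ rows, r.length = LN := by
    intro r hr
    obtain ⟨idx, _, rfl⟩ := List.mem_map.mp hr
    simp
  have hxcols' : xcols = rows.flatMap id := by
    rw [hxcols, hIDS, List.flatMap_map, hrows, List.flatMap_map]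
    refine List.flatMap_congr ?_
    intro idx hidx
    have h1 := hids idx hidx
    rw [hlmx']
    have := pvRowEq ch n M idx h1.1 (hMub idx hidx) hMn
    simpa [hLN] using this
  -- chunks are exactly the rows
  have hchunks' : chunks = rows := by
    rw [hchunks, hxcols', hlmx', ← hLNc]
    exact pvChunksInt rows LN hLNpos hrowlen
  -- the transpose
  have hzip : pvZipStar rows
      = (List.range LN).map (fun (j : Nat) => ids.map (fun idx => ch (idx + (j : Int)))) := by
    unfold pvZipStar
    have hlensz : rows.map List.length = ids.map (fun _ => LN) := by
      rw [hrows, List.map_map]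
      refine List.map_congr_left ?_
      intro idx _
      simp [Function.comp]
    have hmin : (rows.map List.length).min? = some LN := by
      rw [hlensz]
      refine pvMinConst _ LN ?_ ?_
      · simpa [List.map_eq_nil_iff] using hne
      · intro x hx
        obtain ⟨_, _, rfl⟩ := List.mem_map.mp hx
        rfl
    rw [hmin]
    simp only [Option.getD_some]
    refine List.map_congr_left ?_
    intro j hj
    have hjL : j < LN := List.mem_range.mp hj
    rw [hrows, List.map_map]
    refine List.map_congr_left ?_
    intro idx _
    simp only [Function.comp]
    simp [List.getD, hjL]
  -- the B side
  have hB : (PySem.List.pyRange 0 lmxB 1).map (fun j => ids.map (fun idx => ch (idx + j)))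
      = (List.range LN).map (fun (j : Nat) => ids.map (fun idx => ch (idx + (j : Int)))) := by
    rw [hlmxB, hmax]
    simp only [Option.getD_some]
    rw [max_eq_right (by omega : (0:Int) ≤ n - M)]
    rw [PySem.List.pyRange_one, List.map_map]
    have h1 : (n - M - 0) = n - M := by omega
    rw [h1, ← hLN]
    refine List.map_congr_left ?_
    intro k _
    simp [Function.comp]
  rw [hchunks', hzip, ← hB]

theorem scan_mask_proof : ∀ (xseq : String) (xmask : List Int), Pre_scan_mask xseq xmask →
    scan_mask xseq xmask = scan_mask_alt xseq xmask := by
  intro xseq xmask hpre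
  obtain ⟨⟨b, hb, hbne⟩, hlt⟩ := hpre
  simp only [scan_mask, scan_mask_alt]
  set t := xseq.toList with ht
  set n : Int := if ((t.length : Int)) < 10 then (10:Int) else (t.length : Int) with hn
  have hnmax : max ((t.length : Int)) 10 = n := by rw [hn]; split_ifs <;> omega
  set ids : List Int := ((PySem.List.enumerate xmask 0).filter (fun p => p.2 != 0)).map (fun p => p.1) with hidsdef
  have hids : ∀ idx ∈ ids, 0 ≤ idx ∧ idx < n := by
    intro idx hidx
    rw [hidsdef] at hidx
    obtain ⟨p, hpf, rfl⟩ := List.mem_map.mp hidx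
    have hpm := List.mem_filter.mp hpf
    have hnz : p.2 ≠ 0 := by simpa using hpm.2
    have hub : p.1 < n := by
      rw [← hnmax]
      exact hlt p hpm.1 hnz
    obtain ⟨k, hk, hpk⟩ := (PySem.List.mem_enumerate_iff xmask 0 p).mp hpm.1
    constructor
    · rw [hpk]; simp
    · exact hub
  have hne : ids ≠ [] := by
    obtain ⟨k, hk, hke⟩ := List.mem_iff_getElem.mp hb
    have hpm : ((0:Int) + (k:Int), b) ∈ PySem.List.enumerate xmask 0 := by
      rw [PySem.List.mem_enumerate_iff]
      exact ⟨k, hk, by rw [hke]⟩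
    have hpf : ((0:Int) + (k:Int), b) ∈ (PySem.List.enumerate xmask 0).filter (fun p => p.2 != 0) :=
      List.mem_filter.mpr ⟨hpm, by simpa using hbne⟩
    exact List.ne_nil_of_mem (List.mem_map.mpr ⟨((0:Int) + (k:Int), b), hpf, rfl⟩)
  exact pvCore _ n ids _ _ _ _ _ hids hne rfl rfl rfl rfl rfl

-- ===== VERDICT (by name: the statement is the Claim_ definition above) =====
theorem scan_mask_spec : Claim_equal_scan_mask := by
  intro xseq xmask _ hpre
  unfold Spec_scan_mask
  exact scan_mask_proof xseq xmask hpre
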